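-- pv_equiv track=rewrite | github.com/a0kuma/torchgpipeCheckpoint | torchgpipe/gpipe.py | layer_indices_to_partitions
-- ===== SOURCE A (Python) =====
-- from typing import TYPE_CHECKING, Any, Iterable, List, Optional, Set, Tuple, Union, cast
--
-- def layer_indices_to_partitions(layer_indices: Iterable[int], balance: List[int]) -> Set[int]:
--     """Convert layer indices to partition indices based on balance.
--
--     Args:
--         layer_indices: Indices of layers in the original sequential module.
--         balance: List showing how many layers are in each partition.
--
--     Returns:
--         Set of partition indices that contain the specified layers.
--
--     Example:
--         If balance = [3, 3, 4] (10 layers split into 3 partitions):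
--         - Partition 0: layers 0, 1, 2
--         - Partition 1: layers 3, 4, 5
--         - Partition 2: layers 6, 7, 8, 9
--
--         layer_indices_to_partitions([3, 5, 7], [3, 3, 4]) returns {1, 2}
--     """
--     partition_indices = set()
--     layer_to_partition = {}
--
--     # Build mapping from layer index to partition index
--     layer_idx = 0
--     for partition_idx, num_layers in enumerate(balance):
--         for _ in range(num_layers):
--             layer_to_partition[layer_idx] = partition_idx
--             layer_idx += 1
--
--     # Convert layer indices to partition indices
--     for layer_idx in layer_indices:
--         if layer_idx in layer_to_partition:
--             partition_indices.add(layer_to_partition[layer_idx])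
--
--     return partition_indices
-- ===== SOURCE B (Python) =====
-- def layer_indices_to_partitions(layer_indices, balance):
--     """Prefix sums of balance + binary search per queried layer index."""
--     prefix = []
--     total = 0
--     for num_layers in balance:
--         if num_layers > 0:
--             total += num_layers
--         prefix.append(total)
--     partition_indices = set()
--     for i in layer_indices:
--         if 0 <= i < total:
--             lo, hi = 0, len(prefix) - 1
--             while lo < hi:
--                 mid = (lo + hi) // 2
--                 if prefix[mid] > i:
--                     hi = mid
--                 else:
--                     lo = mid + 1
--             partition_indices.add(lo)
--     return partition_indices
-- ===== Notes on version B (the rewrite author's own statement) =====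
-- stated objective: faster
-- what changed: Instead of materialising a dict with one entry per layer (sum(balance) insertions) and looking each query up, B computes the P prefix sums of balance once and binary-searches each queried index in them, skipping out-of-range indices.
import Mathlib
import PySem

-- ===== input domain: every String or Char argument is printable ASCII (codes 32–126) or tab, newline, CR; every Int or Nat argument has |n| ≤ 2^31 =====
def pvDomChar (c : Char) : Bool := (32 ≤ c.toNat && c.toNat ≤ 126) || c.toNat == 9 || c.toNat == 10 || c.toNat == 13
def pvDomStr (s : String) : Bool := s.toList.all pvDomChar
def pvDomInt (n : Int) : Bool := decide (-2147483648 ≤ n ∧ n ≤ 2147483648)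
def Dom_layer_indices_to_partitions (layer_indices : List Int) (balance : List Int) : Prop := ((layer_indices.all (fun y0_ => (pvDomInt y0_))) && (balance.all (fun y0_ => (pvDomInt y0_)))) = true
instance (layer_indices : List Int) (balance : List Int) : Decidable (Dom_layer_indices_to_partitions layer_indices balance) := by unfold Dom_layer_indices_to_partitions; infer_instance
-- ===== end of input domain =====

-- B replaces A's layer→partition dict (one entry per layer) by prefix sums over balance and a
-- binary search per queried index: a different algorithm, O(P + Q·log P) instead of O(sum(balance) + Q).

-- ===== PORT A =====
-- builds the layer_to_partition dict over enumerate(balance), then looks each query up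
-- the layer_to_partition dict is only ever written and looked up (never iterated), so it is
-- ported as Std.HashMap (exact for those operations; PySem.Dict's list would be quadratic here)
def layer_indices_to_partitions (layer_indices : List Int) (balance : List Int) : List Int :=
  let st := (PySem.List.enumerate balance 0).foldl
      (fun (st : Std.HashMap Int Int × Int) pb =>
        (PySem.List.pyRange 0 pb.2 1).foldl
          (fun (st : Std.HashMap Int Int × Int) _ => (st.1.insert st.2 pb.1, st.2 + 1)) st)
      (∅, 0)
  layer_indices.foldl (fun acc i =>
    match st.1[i]? with
    | some p => PySem.Set.add acc p
    | none => acc) PySem.Set.empty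

-- ===== PORT B =====
-- hand-written while-loop binary search from Source B: first index in [lo,hi] whose prefix entry
-- exceeds i (pyGetD's default 0 only makes the lookup total; mid always stays in range)
def bsearchB (pre : List Int) (i : Int) : Nat → Int → Int → Int
  | 0, lo, _ => lo
  | fuel + 1, lo, hi =>
    if lo < hi then
      let mid := PySem.Int.floordiv (lo + hi) 2
      if PySem.List.pyGetD pre mid 0 > i then bsearchB pre i fuel lo mid
      else bsearchB pre i fuel (mid + 1) hi
    else lo

def layer_indices_to_partitions_alt (layer_indices : List Int) (balance : List Int) : List Int :=
  let st := balance.foldl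
      (fun (st : List Int × Int) b =>
        let t := if b > 0 then st.2 + b else st.2
        (st.1 ++ [t], t)) ([], 0)
  layer_indices.foldl (fun acc i =>
    if 0 ≤ i ∧ i < st.2 then
      PySem.Set.add acc (bsearchB st.1 i ((st.1.length : Int) - 1).toNat 0 ((st.1.length : Int) - 1))
    else acc) PySem.Set.empty

-- ===== PRECONDITION & SPEC =====
def Spec_layer_indices_to_partitions (layer_indices : List Int) (balance : List Int) (out : List Int) : Prop := out = layer_indices_to_partitions_alt layer_indices balance
instance (layer_indices : List Int) (balance : List Int) (out : List Int) : Decidable (Spec_layer_indices_to_partitions layer_indices balance out) := by unfold Spec_layer_indices_to_partitions; infer_instance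

-- ===== CLAIM (what is proved, stated in full; the proofs are below) =====
def Claim_equal_layer_indices_to_partitions : Prop := ∀ (layer_indices : List Int) (balance : List Int), Dom_layer_indices_to_partitions layer_indices balance → Spec_layer_indices_to_partitions layer_indices balance (layer_indices_to_partitions layer_indices balance)

-- ===== LEMMAS AND PROOFS =====

-- number of layers a balance entry b contributes
def posB (b : Int) : Int := if b > 0 then b else 0

-- total number of layers
def sumB : List Int → Int
  | [] => 0
  | b :: bs => posB b + sumB bs

-- the prefix list B builds, starting from running total t
def plAux : List Int → Int → List Int
  | [], _ => []
  | b :: bs, t => (t + posB b) :: plAux bs (t + posB b)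

-- k-th prefix sum (meaningful for k < bs.length)
def preS : List Int → Nat → Int
  | [], _ => 0
  | b :: _, 0 => posB b
  | b :: bs, k + 1 => posB b + preS bs k

-- the partition index of layer i (meaningful for 0 ≤ i < sumB bs)
def pf : List Int → Int → Nat
  | [], _ => 0
  | b :: bs, i => if i < posB b then 0 else pf bs (i - posB b) + 1

theorem posB_nonneg (b : Int) : 0 ≤ posB b := by unfold posB; split <;> omega

theorem sumB_nonneg (bs : List Int) : 0 ≤ sumB bs := by
  induction bs with
  | nil => simp [sumB]
  | cons b bs ih => have := posB_nonneg b; simp [sumB]; omega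

theorem preS_nonneg (bs : List Int) (k : Nat) : 0 ≤ preS bs k := by
  induction bs generalizing k with
  | nil => simp [preS]
  | cons b bs ih =>
    have := posB_nonneg b
    cases k with
    | zero => simp [preS]; omega
    | succ k => have := ih k; simp [preS]; omega

theorem length_plAux (bs : List Int) (t : Int) : (plAux bs t).length = bs.length := by
  induction bs generalizing t with
  | nil => rfl
  | cons b bs ih => simp [plAux, ih]

theorem getElem?_plAux (bs : List Int) (t : Int) (k : Nat) (hk : k < bs.length) :
    (plAux bs t)[k]? = some (t + preS bs k) := by
  induction bs generalizing t k with
  | nil => simp at hk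
  | cons b bs ih =>
    cases k with
    | zero => simp [plAux, preS]
    | succ k =>
      have := ih (t + posB b) k (by simpa using hk)
      simp only [plAux, preS, List.getElem?_cons_succ]
      rw [this]
      simp; ring

theorem foldB_eq (bs : List Int) (acc : List Int) (t : Int) :
    bs.foldl (fun (st : List Int × Int) b =>
        let u := if b > 0 then st.2 + b else st.2
        (st.1 ++ [u], u)) (acc, t) = (acc ++ plAux bs t, t + sumB bs) := by
  induction bs generalizing acc t with
  | nil => simp [plAux, sumB]
  | cons b bs ih =>
    have hpos : (if b > 0 then t + b else t) = t + posB b := by unfold posB; split <;> omega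
    simp only [List.foldl_cons]
    show bs.foldl _ (acc ++ [if b > 0 then t + b else t], if b > 0 then t + b else t) = _
    rw [hpos, ih]
    simp [plAux, sumB]
    omega

theorem pf_lt_length (bs : List Int) (i : Int) (h0 : 0 ≤ i) (h1 : i < sumB bs) :
    pf bs i < bs.length := by
  induction bs generalizing i with
  | nil => simp [sumB] at h1; omega
  | cons b bs ih =>
    by_cases hb : i < posB b
    · simp [pf, hb]
    · have := posB_nonneg b
      simp only [pf, if_neg hb, List.length_cons]
      have := ih (i - posB b) (by omega) (by simp [sumB] at h1; omega)
      omega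

theorem preS_le_of_lt_pf (bs : List Int) (i : Int) (k : Nat) (hk : k < pf bs i) :
    preS bs k ≤ i := by
  induction bs generalizing i k with
  | nil => simp [pf] at hk
  | cons b bs ih =>
    by_cases hb : i < posB b
    · simp [pf, hb] at hk
    · cases k with
      | zero => simp [preS]; omega
      | succ k =>
        simp only [pf, if_neg hb] at hk
        have := ih (i - posB b) k (by omega)
        simp [preS]; omega

theorem lt_preS_of_pf_le (bs : List Int) (i : Int) (k : Nat) (h0 : 0 ≤ i)
    (hk : pf bs i ≤ k) (hlen : k < bs.length) : i < preS bs k := by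
  induction bs generalizing i k with
  | nil => simp at hlen
  | cons b bs ih =>
    by_cases hb : i < posB b
    · cases k with
      | zero => simpa [preS]
      | succ k => have := preS_nonneg bs k; simp [preS]; omega
    · cases k with
      | zero => simp [pf, hb] at hk
      | succ k =>
        simp only [pf, if_neg hb] at hk
        have := ih (i - posB b) k (by omega) (by omega) (by simpa using hlen)
        simp [preS]; omega

-- binary search returns the distinguished split point (fuel only bounds the iteration count)
theorem bsearchB_eq (pre : List Int) (i : Int) (ans : Int) :
    ∀ (fuel : Nat) (lo hi : Int), (hi - lo).toNat ≤ fuel → lo ≤ ans → ans ≤ hi →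
      (∀ k : Int, lo ≤ k → k < ans → PySem.List.pyGetD pre k 0 ≤ i) →
      (∀ k : Int, ans ≤ k → k ≤ hi → i < PySem.List.pyGetD pre k 0) →
      bsearchB pre i fuel lo hi = ans := by
  intro fuel
  induction fuel with
  | zero =>
    intro lo hi hn h1 h2 _ _
    unfold bsearchB
    omega
  | succ n ih =>
    intro lo hi hn h1 h2 hlo hhi
    unfold bsearchB
    by_cases hlh : lo < hi
    · rw [if_pos hlh]
      have hm1 := (PySem.Int.floordiv_lt_iff_lt_mul (a := lo + hi) (b := 2) (q := hi) (by omega)).mpr (by omega)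
      have hm2 := (PySem.Int.le_floordiv_iff_mul_le (a := lo + hi) (b := 2) (q := lo) (by omega)).mpr (by omega)
      set mid := PySem.Int.floordiv (lo + hi) 2 with hmid
      by_cases hcmp : PySem.List.pyGetD pre mid 0 > i
      · rw [if_pos hcmp]
        have hans : ans ≤ mid := by
          by_contra hc
          exact absurd hcmp (by simpa using hlo mid (by omega) (by omega))
        exact ih lo mid (by omega) h1 hans hlo (fun k hk1 hk2 => hhi k hk1 (by omega))
      · rw [if_neg hcmp]
        have hans : mid + 1 ≤ ans := by
          by_contra hc
          exact absurd (hhi mid (by omega) (by omega)) (by omega)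
        exact ih (mid + 1) hi (by omega) hans h2 (fun k hk1 hk2 => hlo k (by omega) hk2) hhi
    · rw [if_neg hlh]; omega

-- A's inner loop: the running index advances by the length, inserting p at keys off, off+1, …
theorem innerA_snd (l : List Int) (p : Int) (d : Std.HashMap Int Int) (off : Int) :
    (l.foldl (fun (st : Std.HashMap Int Int × Int) _ => (st.1.insert st.2 p, st.2 + 1)) (d, off)).2
      = off + l.length := by
  induction l generalizing d off with
  | nil => simp
  | cons x l ih => simp [ih]; omega

theorem innerA_get? (l : List Int) (p : Int) (d : Std.HashMap Int Int) (off i : Int) :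
    (l.foldl (fun (st : Std.HashMap Int Int × Int) _ => (st.1.insert st.2 p, st.2 + 1)) (d, off)).1[i]?
      = if off ≤ i ∧ i < off + l.length then some p else d[i]? := by
  induction l generalizing d off with
  | nil =>
    simp only [List.foldl_nil]
    rw [if_neg (by simp)]
  | cons x l ih =>
    simp only [List.foldl_cons]
    rw [ih]
    by_cases h1 : off + 1 ≤ i ∧ i < off + 1 + (l.length : Int)
    · rw [if_pos h1, if_pos (by simp only [List.length_cons]; push_cast; omega)]
    · rw [if_neg h1, Std.HashMap.getElem?_insert]
      by_cases hio : i = off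
      · rw [if_pos (by simp [hio]), if_pos (by simp only [List.length_cons]; push_cast; omega)]
      · rw [if_neg (by simp [Ne.symm hio]), if_neg (by simp only [List.length_cons]; push_cast; omega)]

theorem outerA_get? (bs : List Int) (s : Int) (d : Std.HashMap Int Int) (off i : Int) :
    ((PySem.List.enumerate bs s).foldl
      (fun (st : Std.HashMap Int Int × Int) pb =>
        (PySem.List.pyRange 0 pb.2 1).foldl
          (fun (st : Std.HashMap Int Int × Int) _ => (st.1.insert st.2 pb.1, st.2 + 1)) st) (d, off)).1[i]?
      = if off ≤ i ∧ i < off + sumB bs then some (s + (pf bs (i - off) : Int)) else d[i]? := by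
  induction bs generalizing s d off with
  | nil =>
    simp [PySem.List.enumerate_nil, sumB]
  | cons b bs ih =>
    rw [PySem.List.enumerate_cons, List.foldl_cons]
    have hlen : (((PySem.List.pyRange 0 b 1).length : Int)) = posB b := by
      rw [PySem.List.length_pyRange_one]; unfold posB; split <;> omega
    have hsplit := innerA_snd (PySem.List.pyRange 0 b 1) s d off
    set st1 := (PySem.List.pyRange 0 b 1).foldl
        (fun (st : Std.HashMap Int Int × Int) _ => (st.1.insert st.2 s, st.2 + 1)) (d, off) with hst1
    rw [show st1 = (st1.1, st1.2) from rfl]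
    rw [ih, hsplit, hlen]
    rw [show st1.1[i]? = if off ≤ i ∧ i < off + posB b then some s else d[i]? from by
      rw [hst1, innerA_get?, hlen]]
    have hp := posB_nonneg b
    have hsb := sumB_nonneg bs
    by_cases hA : off + posB b ≤ i ∧ i < off + posB b + sumB bs
    · rw [if_pos hA, if_pos (by simp only [sumB]; omega)]
      have h2 : ¬ (i - off < posB b) := by omega
      simp only [pf, if_neg h2]
      have h3 : i - (off + posB b) = i - off - posB b := by omega
      rw [h3]
      congr 1
      push_cast
      omega
    · rw [if_neg hA]
      by_cases hB : off ≤ i ∧ i < off + posB b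
      · rw [if_pos hB, if_pos (by simp only [sumB]; omega)]
        have h2 : i - off < posB b := by omega
        simp [pf, h2]
      · rw [if_neg hB, if_neg (by simp only [sumB]; omega)]

theorem main_per_query (balance : List Int) (i : Int) :
    (((PySem.List.enumerate balance 0).foldl
      (fun (st : Std.HashMap Int Int × Int) pb =>
        (PySem.List.pyRange 0 pb.2 1).foldl
          (fun (st : Std.HashMap Int Int × Int) _ => (st.1.insert st.2 pb.1, st.2 + 1)) st)
      ((∅ : Std.HashMap Int Int), 0)).1[i]?)
      = if 0 ≤ i ∧ i < sumB balance
        then some (bsearchB (plAux balance 0) i (((balance.length : Int) - 1).toNat) 0 ((balance.length : Int) - 1))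
        else none := by
  rw [outerA_get?]
  simp only [zero_add, Int.sub_zero]
  by_cases h : 0 ≤ i ∧ i < sumB balance
  · rw [if_pos h, if_pos h]
    have hlt := pf_lt_length balance i h.1 h.2
    have hget : ∀ k : Int, 0 ≤ k → k.toNat < balance.length →
        PySem.List.pyGetD (plAux balance 0) k 0 = preS balance k.toNat := by
      intro k hk0 hkl
      rw [PySem.List.pyGetD_eq_getElem _ _ hk0
        (by rw [length_plAux]; omega)]
      have h' := getElem?_plAux balance 0 k.toNat hkl
      rw [List.getElem?_eq_getElem (by rw [length_plAux]; exact hkl)] at h'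
      have h'' := Option.some.inj h'
      omega
    congr 1
    refine (bsearchB_eq (plAux balance 0) i ((pf balance i : Int)) (((balance.length : Int) - 1).toNat) 0 ((balance.length : Int) - 1) (by omega) (by omega) (by omega) ?_ ?_).symm
    · intro k hk1 hk2
      have hkl : k.toNat < balance.length := by omega
      rw [hget k hk1 hkl]
      have := preS_le_of_lt_pf balance i k.toNat (by omega)
      omega
    · intro k hk1 hk2
      have hk0 : (0 : Int) ≤ k := by omega
      have hkl : k.toNat < balance.length := by omega
      rw [hget k hk0 hkl]
      have := lt_preS_of_pf_le balance i k.toNat h.1 (by omega) hkl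
      omega
  · rw [if_neg h, if_neg h, Std.HashMap.getElem?_empty]

-- ===== VERDICT (by name: the statement is the Claim_ definition above) =====
theorem layer_indices_to_partitions_spec : Claim_equal_layer_indices_to_partitions := by
  intro layer_indices balance _
  unfold Spec_layer_indices_to_partitions
  unfold layer_indices_to_partitions layer_indices_to_partitions_alt
  rw [foldB_eq]
  simp only [List.nil_append, length_plAux, zero_add]
  apply PySem.List.foldl_congr_mem
  intro acc i _
  rw [main_per_query]
  by_cases h : 0 ≤ i ∧ i < sumB balance
  · rw [if_pos h, if_pos h]
  · rw [if_neg h, if_neg h]
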